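-- pv_equiv track=rewrite | github.com/alexandreabeinfo/controle-operacional-realtime | abnf000u00s00003.py | abnf_verifica_numero_milhares_decimais
-- ===== SOURCE A (Python) =====
-- def abnf_verifica_numero_milhares_decimais(svalofin):
--     sstructu = '';
--     bvalidad = False
--     itamvari = len(svalofin)
--     for icontd01 in range(itamvari):
--         sdignume = svalofin[icontd01]
--         if ((sdignume == '0') or
--             (sdignume == '1') or
--             (sdignume == '2') or
--             (sdignume == '3') or
--             (sdignume == '4') or
--             (sdignume == '5') or
--             (sdignume == '6') or
--             (sdignume == '7') or
--             (sdignume == '8') or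
--             (sdignume == '9')): sstructu = sstructu + 'x'
--         elif (sdignume == '-'): sstructu = sstructu + '-'
--         elif (sdignume == '.'): sstructu = sstructu + '.'
--         elif (sdignume == ','): sstructu = sstructu + ','
--         else:                   sstructu = sstructu + 'y'
--     lsvalido = [
--               'x,x' ,           'x,xx' ,           'x,xxx' ,           'x,xxxx' ,           'x,xxxxx' ,           'x,xxxxxx' ,
--              '-x,x' ,          '-x,xx' ,          '-x,xxx' ,          '-x,xxxx' ,          '-x,xxxxx' ,          '-x,xxxxxx' ,
--              'xx,x' ,          'xx,xx' ,          'xx,xxx' ,          'xx,xxxx' ,          'xx,xxxxx' ,          'xx,xxxxxx' ,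
--             '-xx,x' ,         '-xx,xx' ,         '-xx,xxx' ,         '-xx,xxxx' ,         '-xx,xxxxx' ,         '-xx,xxxxxx' ,
--             'xxx,x' ,         'xxx,xx' ,         'xxx,xxx' ,         'xxx,xxxx' ,         'xxx,xxxxx' ,         'xxx,xxxxxx' ,
--            '-xxx,x' ,        '-xxx,xx' ,        '-xxx,xxx' ,        '-xxx,xxxx' ,        '-xxx,xxxxx' ,        '-xxx,xxxxxx' ,
--           'x.xxx,x' ,       'x.xxx,xx' ,       'x.xxx,xxx' ,       'x.xxx,xxxx' ,       'x.xxx,xxxxx' ,       'x.xxx,xxxxxx' ,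
--          '-x.xxx,x' ,      '-x.xxx,xx' ,      '-x.xxx,xxx' ,      '-x.xxx,xxxx' ,      '-x.xxx,xxxxx' ,      '-x.xxx,xxxxxx' ,
--          'xx.xxx,x' ,      'xx.xxx,xx' ,      'xx.xxx,xxx' ,      'xx.xxx,xxxx' ,      'xx.xxx,xxxxx' ,      'xx.xxx,xxxxxx' ,
--         '-xx.xxx,x' ,     '-xx.xxx,xx' ,     '-xx.xxx,xxx' ,     '-xx.xxx,xxxx' ,     '-xx.xxx,xxxxx' ,     '-xx.xxx,xxxxxx' ,
--         'xxx.xxx,x' ,     'xxx.xxx,xx' ,     'xxx.xxx,xxx' ,     'xxx.xxx,xxxx' ,     'xxx.xxx,xxxxx' ,     'xxx.xxx,xxxxxx' ,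
--        '-xxx.xxx,x' ,    '-xxx.xxx,xx' ,    '-xxx.xxx,xxx' ,    '-xxx.xxx,xxxx' ,    '-xxx.xxx,xxxxx' ,    '-xxx.xxx,xxxxxx' ,
--       'x.xxx.xxx,x' ,   'x.xxx.xxx,xx' ,   'x.xxx.xxx,xxx' ,   'x.xxx.xxx,xxxx' ,   'x.xxx.xxx,xxxxx' ,   'x.xxx.xxx,xxxxxx' ,
--      '-x.xxx.xxx,x' ,  '-x.xxx.xxx,xx' ,  '-x.xxx.xxx,xxx' ,  '-x.xxx.xxx,xxxx' ,  '-x.xxx.xxx,xxxxx' ,  '-x.xxx.xxx,xxxxxx' ,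
--      'xx.xxx.xxx,x' ,  'xx.xxx.xxx,xx' ,  'xx.xxx.xxx,xxx' ,  'xx.xxx.xxx,xxxx' ,  'xx.xxx.xxx,xxxxx' ,  'xx.xxx.xxx,xxxxxx' ,
--     '-xx.xxx.xxx,x' , '-xx.xxx.xxx,xx' , '-xx.xxx.xxx,xxx' , '-xx.xxx.xxx,xxxx' , '-xx.xxx.xxx,xxxxx' , '-xx.xxx.xxx,xxxxxx' ,
--     'xxx.xxx.xxx,x' , 'xxx.xxx.xxx,xx' , 'xxx.xxx.xxx,xxx' , 'xxx.xxx.xxx,xxxx' , 'xxx.xxx.xxx,xxxxx' , 'xxx.xxx.xxx,xxxxxx' ]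
--     if sstructu in lsvalido:
--         bvalidad = True
-- 	# if ((substr($nvalofin,0,2) == '-0') and (substr($nvalofin,0,3) <> '-0,')) $numret = false;
-- 	# if ((substr($nvalofin,0,1) ==  '0') and (substr($nvalofin,0,2) <>  '0,')) $numret = false;
-- 	# if ($nvalofin == '-0,00') $numret = false;
--     return bvalidad
-- ===== SOURCE B (Python) =====
-- def abnf_verifica_numero_milhares_decimais(svalofin):
--     s = svalofin[1:] if svalofin.startswith('-') else svalofin
--     parts = s.split(',')
--     if len(parts) != 2:
--         return False
--     intpart, decpart = parts
--     if not (1 <= len(decpart) <= 6 and decpart.isdigit()):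
--         return False
--     groups = intpart.split('.')
--     if len(groups) > 3:
--         return False
--     if not (1 <= len(groups[0]) <= 3 and groups[0].isdigit()):
--         return False
--     for g in groups[1:]:
--         if not (len(g) == 3 and g.isdigit()):
--             return False
--     return True
-- ===== Notes on version B (the rewrite author's own statement) =====
-- stated objective: simpler
-- what changed: B parses the string directly (strip an optional leading minus, split on the comma, check 1-6 decimal digits, split the integer part on dots and check a 1-3 digit leading group plus at most two 3-digit groups) instead of A's char-by-char concatenation of a pattern string that is then looked up in a literal table of valid patterns.
-- intended difference: On negative numbers whose integer part has a three-digit leading group and two three-digit thousand groups (minus sign, three digits, then twice a dot plus three digits, then a comma and one to six decimal digits) A returns False because that one row is missing from its pattern table while every other sign/width combination is present; B returns True, the intended value. — e.g. on abnf_verifica_numero_milhares_decimais("-123.456.789,0"): A returns false, B returns true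
import Mathlib
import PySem

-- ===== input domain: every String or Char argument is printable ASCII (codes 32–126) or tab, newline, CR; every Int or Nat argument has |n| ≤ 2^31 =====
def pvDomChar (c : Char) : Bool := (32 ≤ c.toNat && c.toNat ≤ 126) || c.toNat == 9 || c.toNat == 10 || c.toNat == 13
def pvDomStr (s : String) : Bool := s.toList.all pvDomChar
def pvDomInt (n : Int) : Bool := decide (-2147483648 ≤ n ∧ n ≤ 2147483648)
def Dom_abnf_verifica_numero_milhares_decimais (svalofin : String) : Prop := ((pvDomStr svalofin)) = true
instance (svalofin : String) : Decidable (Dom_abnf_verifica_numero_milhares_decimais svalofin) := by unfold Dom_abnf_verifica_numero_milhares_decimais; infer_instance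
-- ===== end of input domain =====

-- B replaces A's char-by-char pattern-string construction plus table lookup with a direct split-based
-- parse (simpler and measured faster); on the shape described at D_ below, B fixes A's missing table row.
-- ===== PORT A =====
-- A-side helper: the if/elif classification chain of A's loop body (digit -> 'x', '-' -> '-', '.' -> '.', ',' -> ',', else 'y')
def pvClassify (sdignume : Char) : Char :=
  if sdignume = '0' ∨ sdignume = '1' ∨ sdignume = '2' ∨ sdignume = '3' ∨ sdignume = '4' ∨
     sdignume = '5' ∨ sdignume = '6' ∨ sdignume = '7' ∨ sdignume = '8' ∨ sdignume = '9' then 'x'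
  else if sdignume = '-' then '-'
  else if sdignume = '.' then '.'
  else if sdignume = ',' then ','
  else 'y'

def pvLsvalido : List (List Char) := [
  ['x', ',', 'x'], ['x', ',', 'x', 'x'], ['x', ',', 'x', 'x', 'x'],
  ['x', ',', 'x', 'x', 'x', 'x'], ['x', ',', 'x', 'x', 'x', 'x', 'x'], ['x', ',', 'x', 'x', 'x', 'x', 'x', 'x'],
  ['-', 'x', ',', 'x'], ['-', 'x', ',', 'x', 'x'], ['-', 'x', ',', 'x', 'x', 'x'],
  ['-', 'x', ',', 'x', 'x', 'x', 'x'], ['-', 'x', ',', 'x', 'x', 'x', 'x', 'x'], ['-', 'x', ',', 'x', 'x', 'x', 'x', 'x', 'x'],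
  ['x', 'x', ',', 'x'], ['x', 'x', ',', 'x', 'x'], ['x', 'x', ',', 'x', 'x', 'x'],
  ['x', 'x', ',', 'x', 'x', 'x', 'x'], ['x', 'x', ',', 'x', 'x', 'x', 'x', 'x'], ['x', 'x', ',', 'x', 'x', 'x', 'x', 'x', 'x'],
  ['-', 'x', 'x', ',', 'x'], ['-', 'x', 'x', ',', 'x', 'x'], ['-', 'x', 'x', ',', 'x', 'x', 'x'],
  ['-', 'x', 'x', ',', 'x', 'x', 'x', 'x'], ['-', 'x', 'x', ',', 'x', 'x', 'x', 'x', 'x'], ['-', 'x', 'x', ',', 'x', 'x', 'x', 'x', 'x', 'x'],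
  ['x', 'x', 'x', ',', 'x'], ['x', 'x', 'x', ',', 'x', 'x'], ['x', 'x', 'x', ',', 'x', 'x', 'x'],
  ['x', 'x', 'x', ',', 'x', 'x', 'x', 'x'], ['x', 'x', 'x', ',', 'x', 'x', 'x', 'x', 'x'], ['x', 'x', 'x', ',', 'x', 'x', 'x', 'x', 'x', 'x'],
  ['-', 'x', 'x', 'x', ',', 'x'], ['-', 'x', 'x', 'x', ',', 'x', 'x'], ['-', 'x', 'x', 'x', ',', 'x', 'x', 'x'],
  ['-', 'x', 'x', 'x', ',', 'x', 'x', 'x', 'x'], ['-', 'x', 'x', 'x', ',', 'x', 'x', 'x', 'x', 'x'], ['-', 'x', 'x', 'x', ',', 'x', 'x', 'x', 'x', 'x', 'x'],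
  ['x', '.', 'x', 'x', 'x', ',', 'x'], ['x', '.', 'x', 'x', 'x', ',', 'x', 'x'], ['x', '.', 'x', 'x', 'x', ',', 'x', 'x', 'x'],
  ['x', '.', 'x', 'x', 'x', ',', 'x', 'x', 'x', 'x'], ['x', '.', 'x', 'x', 'x', ',', 'x', 'x', 'x', 'x', 'x'], ['x', '.', 'x', 'x', 'x', ',', 'x', 'x', 'x', 'x', 'x', 'x'],
  ['-', 'x', '.', 'x', 'x', 'x', ',', 'x'], ['-', 'x', '.', 'x', 'x', 'x', ',', 'x', 'x'], ['-', 'x', '.', 'x', 'x', 'x', ',', 'x', 'x', 'x'],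
  ['-', 'x', '.', 'x', 'x', 'x', ',', 'x', 'x', 'x', 'x'], ['-', 'x', '.', 'x', 'x', 'x', ',', 'x', 'x', 'x', 'x', 'x'], ['-', 'x', '.', 'x', 'x', 'x', ',', 'x', 'x', 'x', 'x', 'x', 'x'],
  ['x', 'x', '.', 'x', 'x', 'x', ',', 'x'], ['x', 'x', '.', 'x', 'x', 'x', ',', 'x', 'x'], ['x', 'x', '.', 'x', 'x', 'x', ',', 'x', 'x', 'x'],
  ['x', 'x', '.', 'x', 'x', 'x', ',', 'x', 'x', 'x', 'x'], ['x', 'x', '.', 'x', 'x', 'x', ',', 'x', 'x', 'x', 'x', 'x'], ['x', 'x', '.', 'x', 'x', 'x', ',', 'x', 'x', 'x', 'x', 'x', 'x'],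
  ['-', 'x', 'x', '.', 'x', 'x', 'x', ',', 'x'], ['-', 'x', 'x', '.', 'x', 'x', 'x', ',', 'x', 'x'], ['-', 'x', 'x', '.', 'x', 'x', 'x', ',', 'x', 'x', 'x'],
  ['-', 'x', 'x', '.', 'x', 'x', 'x', ',', 'x', 'x', 'x', 'x'], ['-', 'x', 'x', '.', 'x', 'x', 'x', ',', 'x', 'x', 'x', 'x', 'x'], ['-', 'x', 'x', '.', 'x', 'x', 'x', ',', 'x', 'x', 'x', 'x', 'x', 'x'],
  ['x', 'x', 'x', '.', 'x', 'x', 'x', ',', 'x'], ['x', 'x', 'x', '.', 'x', 'x', 'x', ',', 'x', 'x'], ['x', 'x', 'x', '.', 'x', 'x', 'x', ',', 'x', 'x', 'x'],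
  ['x', 'x', 'x', '.', 'x', 'x', 'x', ',', 'x', 'x', 'x', 'x'], ['x', 'x', 'x', '.', 'x', 'x', 'x', ',', 'x', 'x', 'x', 'x', 'x'], ['x', 'x', 'x', '.', 'x', 'x', 'x', ',', 'x', 'x', 'x', 'x', 'x', 'x'],
  ['-', 'x', 'x', 'x', '.', 'x', 'x', 'x', ',', 'x'], ['-', 'x', 'x', 'x', '.', 'x', 'x', 'x', ',', 'x', 'x'], ['-', 'x', 'x', 'x', '.', 'x', 'x', 'x', ',', 'x', 'x', 'x'],
  ['-', 'x', 'x', 'x', '.', 'x', 'x', 'x', ',', 'x', 'x', 'x', 'x'], ['-', 'x', 'x', 'x', '.', 'x', 'x', 'x', ',', 'x', 'x', 'x', 'x', 'x'], ['-', 'x', 'x', 'x', '.', 'x', 'x', 'x', ',', 'x', 'x', 'x', 'x', 'x', 'x'],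
  ['x', '.', 'x', 'x', 'x', '.', 'x', 'x', 'x', ',', 'x'], ['x', '.', 'x', 'x', 'x', '.', 'x', 'x', 'x', ',', 'x', 'x'], ['x', '.', 'x', 'x', 'x', '.', 'x', 'x', 'x', ',', 'x', 'x', 'x'],
  ['x', '.', 'x', 'x', 'x', '.', 'x', 'x', 'x', ',', 'x', 'x', 'x', 'x'], ['x', '.', 'x', 'x', 'x', '.', 'x', 'x', 'x', ',', 'x', 'x', 'x', 'x', 'x'], ['x', '.', 'x', 'x', 'x', '.', 'x', 'x', 'x', ',', 'x', 'x', 'x', 'x', 'x', 'x'],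
  ['-', 'x', '.', 'x', 'x', 'x', '.', 'x', 'x', 'x', ',', 'x'], ['-', 'x', '.', 'x', 'x', 'x', '.', 'x', 'x', 'x', ',', 'x', 'x'], ['-', 'x', '.', 'x', 'x', 'x', '.', 'x', 'x', 'x', ',', 'x', 'x', 'x'],
  ['-', 'x', '.', 'x', 'x', 'x', '.', 'x', 'x', 'x', ',', 'x', 'x', 'x', 'x'], ['-', 'x', '.', 'x', 'x', 'x', '.', 'x', 'x', 'x', ',', 'x', 'x', 'x', 'x', 'x'], ['-', 'x', '.', 'x', 'x', 'x', '.', 'x', 'x', 'x', ',', 'x', 'x', 'x', 'x', 'x', 'x'],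
  ['x', 'x', '.', 'x', 'x', 'x', '.', 'x', 'x', 'x', ',', 'x'], ['x', 'x', '.', 'x', 'x', 'x', '.', 'x', 'x', 'x', ',', 'x', 'x'], ['x', 'x', '.', 'x', 'x', 'x', '.', 'x', 'x', 'x', ',', 'x', 'x', 'x'],
  ['x', 'x', '.', 'x', 'x', 'x', '.', 'x', 'x', 'x', ',', 'x', 'x', 'x', 'x'], ['x', 'x', '.', 'x', 'x', 'x', '.', 'x', 'x', 'x', ',', 'x', 'x', 'x', 'x', 'x'], ['x', 'x', '.', 'x', 'x', 'x', '.', 'x', 'x', 'x', ',', 'x', 'x', 'x', 'x', 'x', 'x'],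
  ['-', 'x', 'x', '.', 'x', 'x', 'x', '.', 'x', 'x', 'x', ',', 'x'], ['-', 'x', 'x', '.', 'x', 'x', 'x', '.', 'x', 'x', 'x', ',', 'x', 'x'], ['-', 'x', 'x', '.', 'x', 'x', 'x', '.', 'x', 'x', 'x', ',', 'x', 'x', 'x'],
  ['-', 'x', 'x', '.', 'x', 'x', 'x', '.', 'x', 'x', 'x', ',', 'x', 'x', 'x', 'x'], ['-', 'x', 'x', '.', 'x', 'x', 'x', '.', 'x', 'x', 'x', ',', 'x', 'x', 'x', 'x', 'x'], ['-', 'x', 'x', '.', 'x', 'x', 'x', '.', 'x', 'x', 'x', ',', 'x', 'x', 'x', 'x', 'x', 'x'],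
  ['x', 'x', 'x', '.', 'x', 'x', 'x', '.', 'x', 'x', 'x', ',', 'x'], ['x', 'x', 'x', '.', 'x', 'x', 'x', '.', 'x', 'x', 'x', ',', 'x', 'x'], ['x', 'x', 'x', '.', 'x', 'x', 'x', '.', 'x', 'x', 'x', ',', 'x', 'x', 'x'],
  ['x', 'x', 'x', '.', 'x', 'x', 'x', '.', 'x', 'x', 'x', ',', 'x', 'x', 'x', 'x'], ['x', 'x', 'x', '.', 'x', 'x', 'x', '.', 'x', 'x', 'x', ',', 'x', 'x', 'x', 'x', 'x'], ['x', 'x', 'x', '.', 'x', 'x', 'x', '.', 'x', 'x', 'x', ',', 'x', 'x', 'x', 'x', 'x', 'x']]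

-- Port of A: build the pattern string char by char over range(len), then look it up in the literal table.
def abnf_verifica_numero_milhares_decimais (svalofin : String) : Bool :=
  let l := svalofin.toList
  let itamvari : Int := PySem.List.len l
  let sstructu : List Char :=
    (PySem.List.pyRange 0 itamvari).foldl
      (fun acc icontd01 =>
        let sdignume := PySem.List.pyGetD l icontd01 ' '
        acc ++ [pvClassify sdignume]) []
  if sstructu ∈ pvLsvalido then true else false

-- ===== PORT B =====
-- Port of B (Source B): strip an optional leading '-', split on ',', validate the decimal part,
-- split the integer part on '.' and validate the groups.
def abnf_verifica_numero_milhares_decimais_alt (svalofin : String) : Bool :=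
  let l := svalofin.toList
  let s := if PySem.Chars.startswith l ['-'] then PySem.Chars.slice l (some 1) none else l
  let parts := PySem.Chars.splitOn s [',']
  if parts.length ≠ 2 then false
  else
    let intpart := parts.headD []
    let decpart := (parts.drop 1).headD []
    if ¬ (1 ≤ decpart.length ∧ decpart.length ≤ 6 ∧ PySem.Chars.strIsdigit decpart = true) then false
    else
      let groups := PySem.Chars.splitOn intpart ['.']
      if 3 < groups.length then false
      else if ¬ (1 ≤ (groups.headD []).length ∧ (groups.headD []).length ≤ 3 ∧
                 PySem.Chars.strIsdigit (groups.headD []) = true) then false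
      else (groups.drop 1).all (fun g => g.length == 3 && PySem.Chars.strIsdigit g)

-- ===== PRECONDITION & SPEC =====
-- On negative numbers whose integer part has a three-digit leading group and two three-digit
-- thousand groups (minus sign, three digits, then twice a dot plus three digits, then a comma and
-- one to six decimal digits) A returns False because that one row is missing from its pattern
-- table while every other sign/width combination is present; B returns True, the intended value.
def D_abnf_verifica_numero_milhares_decimais (svalofin : String) : Prop :=
  14 ≤ svalofin.toList.length ∧ svalofin.toList.length ≤ 19 ∧
  svalofin.toList.map (fun c => if PySem.Chars.isdigit c then '0' else c) =
    "-000.000.000,".toList ++ List.replicate (svalofin.toList.length - 13) '0'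
instance (svalofin : String) : Decidable (D_abnf_verifica_numero_milhares_decimais svalofin) := by
  unfold D_abnf_verifica_numero_milhares_decimais; infer_instance

def Spec_abnf_verifica_numero_milhares_decimais (svalofin : String) (out : Bool) : Prop :=
  ¬ D_abnf_verifica_numero_milhares_decimais svalofin → out = abnf_verifica_numero_milhares_decimais_alt svalofin
instance (svalofin : String) (out : Bool) : Decidable (Spec_abnf_verifica_numero_milhares_decimais svalofin out) := by
  unfold Spec_abnf_verifica_numero_milhares_decimais; infer_instance

def pvDiffWitness_abnf_verifica_numero_milhares_decimais : String := "-123.456.789,0"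
def pvDiffWitnessOut_abnf_verifica_numero_milhares_decimais : Bool × Bool := (false, true)

-- ===== CLAIM (what is proved, stated in full; the proofs are below) =====
def Claim_unchanged_abnf_verifica_numero_milhares_decimais : Prop := ∀ (svalofin : String), Dom_abnf_verifica_numero_milhares_decimais svalofin → Spec_abnf_verifica_numero_milhares_decimais svalofin (abnf_verifica_numero_milhares_decimais svalofin)
def Claim_changed_abnf_verifica_numero_milhares_decimais : Prop := Dom_abnf_verifica_numero_milhares_decimais (pvDiffWitness_abnf_verifica_numero_milhares_decimais) ∧ D_abnf_verifica_numero_milhares_decimais (pvDiffWitness_abnf_verifica_numero_milhares_decimais) ∧ abnf_verifica_numero_milhares_decimais (pvDiffWitness_abnf_verifica_numero_milhares_decimais) = pvDiffWitnessOut_abnf_verifica_numero_milhares_decimais.1 ∧ abnf_verifica_numero_milhares_decimais_alt (pvDiffWitness_abnf_verifica_numero_milhares_decimais) = pvDiffWitnessOut_abnf_verifica_numero_milhares_decimais.2 ∧ pvDiffWitnessOut_abnf_verifica_numero_milhares_decimais.1 ≠ pvDiffWitnessOut_abnf_verifica_numero_milhares_decimais.2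
def Claim_exact_abnf_verifica_numero_milhares_decimais : Prop := ∀ (svalofin : String), Dom_abnf_verifica_numero_milhares_decimais svalofin → D_abnf_verifica_numero_milhares_decimais svalofin → abnf_verifica_numero_milhares_decimais svalofin ≠ abnf_verifica_numero_milhares_decimais_alt svalofin

-- ===== LEMMAS AND PROOFS =====
def pvSplitChar (d : Char) : List Char → List Char → List (List Char)
  | pre, [] => [pre.reverse]
  | pre, c :: rest => if c = d then pre.reverse :: pvSplitChar d [] rest else pvSplitChar d (c :: pre) rest

-- proof-side mirror of port B on the classified alphabet {x,-,.,,,y}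
def pvIsXs (g : List Char) : Bool := !g.isEmpty && g.all (· == 'x')

def pvBody (u : List Char) : Bool :=
  let parts := pvSplitChar ',' [] u
  if parts.length ≠ 2 then false
  else
    let intp := parts.headD []
    let decp := (parts.drop 1).headD []
    if ¬ (1 ≤ decp.length ∧ decp.length ≤ 6 ∧ pvIsXs decp = true) then false
    else
      let groups := pvSplitChar '.' [] intp
      if 3 < groups.length then false
      else if ¬ (1 ≤ (groups.headD []).length ∧ (groups.headD []).length ≤ 3 ∧
                 pvIsXs (groups.headD []) = true) then false
      else (groups.drop 1).all (fun g => g.length == 3 && pvIsXs g)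

def pvPbool (t : List Char) : Bool :=
  pvBody (if PySem.Chars.startswith t ['-'] then t.drop 1 else t)

-- the D_ region on the classified string
def pvPatX : List Char := ['-','x','x','x','.','x','x','x','.','x','x','x',',']
abbrev pvDt (t : List Char) : Prop :=
  14 ≤ t.length ∧ t.length ≤ 19 ∧ t = pvPatX ++ List.replicate (t.length - 13) 'x'


-- per-char classification facts
lemma pvDigit_iff (c : Char) : (c = '0' ∨ c = '1' ∨ c = '2' ∨ c = '3' ∨ c = '4' ∨
    c = '5' ∨ c = '6' ∨ c = '7' ∨ c = '8' ∨ c = '9') ↔ ('0' ≤ c ∧ c ≤ '9') := by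
  constructor
  · rintro (rfl|rfl|rfl|rfl|rfl|rfl|rfl|rfl|rfl|rfl) <;> exact ⟨by decide, by decide⟩
  · rintro ⟨h1, h2⟩
    rw [Char.le_def, UInt32.le_iff_toNat_le] at h1 h2
    have ha : ('0').val.toNat = 48 := by decide
    have hb : ('9').val.toNat = 57 := by decide
    rw [ha] at h1; rw [hb] at h2
    have h0 : c.val.toNat = c.toNat := rfl
    rw [h0] at h1 h2
    have he : Char.ofNat c.toNat = c := Char.ofNat_toNat c
    interval_cases h : c.toNat <;> subst he <;> simp

lemma pvClassify_x (c : Char) : (pvClassify c = 'x') ↔ ('0' ≤ c ∧ c ≤ '9') := by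
  rw [← pvDigit_iff]
  unfold pvClassify
  split_ifs with h1 h2 h3 h4 <;> simp_all

lemma pvClassify_dash (c : Char) : (pvClassify c = '-') ↔ (c = '-') := by
  unfold pvClassify
  split_ifs with h1 h2 h3 h4 <;> simp_all
  rcases h1 with rfl|rfl|rfl|rfl|rfl|rfl|rfl|rfl|rfl|rfl <;> decide

lemma pvClassify_dot (c : Char) : (pvClassify c = '.') ↔ (c = '.') := by
  unfold pvClassify
  split_ifs with h1 h2 h3 h4 <;> simp_all
  rcases h1 with rfl|rfl|rfl|rfl|rfl|rfl|rfl|rfl|rfl|rfl <;> decide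

lemma pvClassify_comma (c : Char) : (pvClassify c = ',') ↔ (c = ',') := by
  unfold pvClassify
  split_ifs with h1 h2 h3 h4 <;> simp_all
  rcases h1 with rfl|rfl|rfl|rfl|rfl|rfl|rfl|rfl|rfl|rfl <;> decide

-- port A computes the classified string and looks it up
lemma pvA_eq (s : String) :
    abnf_verifica_numero_milhares_decimais s
      = decide (s.toList.map pvClassify ∈ pvLsvalido) := by
  show (if (List.foldl (fun acc j => (fun a c => a ++ [pvClassify c]) acc (PySem.List.pyGetD s.toList j ' '))
          [] (PySem.List.pyRange 0 (PySem.List.len s.toList)) ∈ pvLsvalido) then true else false)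
      = decide (s.toList.map pvClassify ∈ pvLsvalido)
  rw [PySem.List.foldl_pyRange_pyGetD s.toList ' ' (fun a c => a ++ [pvClassify c]) [] (le_refl 0)]
  rw [Int.toNat_zero, List.drop_zero, PySem.List.foldl_append_singleton_eq_map]
  simp

-- PySem.Chars.splitOn with a one-char separator is pvSplitChar
lemma pvGo_eq (d : Char) : ∀ (fuel : Nat) (l cur : List Char) (acc : List (List Char)),
    l.length ≤ fuel →
    PySem.Chars.splitOn.go [d] fuel l cur acc = acc.reverse ++ pvSplitChar d cur l := by
  intro fuel
  induction fuel with
  | zero =>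
    intro l cur acc h
    have hl : l = [] := by cases l <;> simp_all
    subst hl
    simp [PySem.Chars.splitOn.go, pvSplitChar]
  | succ n ih =>
    intro l cur acc h
    cases l with
    | nil => simp [PySem.Chars.splitOn.go, pvSplitChar]
    | cons c rest =>
      by_cases hc : c = d
      · subst hc
        rw [show PySem.Chars.splitOn.go [c] (n+1) (c :: rest) cur acc
            = PySem.Chars.splitOn.go [c] n (List.drop 1 (c :: rest)) [] (cur.reverse :: acc) by
          simp [PySem.Chars.splitOn.go, List.isPrefixOf]]
        rw [List.drop_one, List.tail_cons, ih rest [] _ (by simpa using h)]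
        simp [pvSplitChar]
      · rw [show PySem.Chars.splitOn.go [d] (n+1) (c :: rest) cur acc
            = PySem.Chars.splitOn.go [d] n rest (c :: cur) acc by
          simp [PySem.Chars.splitOn.go, List.isPrefixOf]
          exact fun h' => absurd h'.symm hc]
        rw [ih rest (c :: cur) acc (by simpa using h)]
        simp [pvSplitChar, hc]

lemma pvSplitOn_char (l : List Char) (d : Char) :
    PySem.Chars.splitOn l [d] = pvSplitChar d [] l := by
  show PySem.Chars.splitOn.go [d] (l.length + 1) l [] [] = pvSplitChar d [] l
  rw [pvGo_eq d (l.length + 1) l [] [] (by omega)]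
  simp

lemma pvMap_splitChar (f : Char → Char) (d : Char) (hf : ∀ c, f c = d ↔ c = d) :
    ∀ (l pre : List Char),
      pvSplitChar d (pre.map f) (l.map f) = (pvSplitChar d pre l).map (List.map f) := by
  intro l
  induction l with
  | nil => intro pre; simp [pvSplitChar]
  | cons c rest ih =>
    intro pre
    by_cases hc : c = d
    · subst hc
      simp only [List.map_cons, pvSplitChar, if_pos ((hf c).mpr rfl)]
      rw [show ([] : List Char) = List.map f [] from rfl, ih []]
      simp
    · simp only [List.map_cons, pvSplitChar, if_neg (fun h => hc ((hf c).mp h)), if_neg hc]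
      rw [show f c :: List.map f pre = List.map f (c :: pre) from rfl, ih (c :: pre)]

lemma pvSplitChar_ne_nil (d : Char) (pre l : List Char) : pvSplitChar d pre l ≠ [] := by
  induction l generalizing pre with
  | nil => simp [pvSplitChar]
  | cons c rest ih => by_cases hc : c = d <;> simp [pvSplitChar, hc, ih]

lemma pvIntercalate_splitChar (d : Char) :
    ∀ (l pre : List Char), List.intercalate [d] (pvSplitChar d pre l) = pre.reverse ++ l := by
  intro l
  induction l with
  | nil => intro pre; simp [pvSplitChar, List.intercalate]
  | cons c rest ih =>
    intro pre
    by_cases hc : c = d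
    · subst hc
      rw [pvSplitChar, if_pos rfl]
      have h2 := ih []
      cases hps : pvSplitChar c [] rest with
      | nil => exact absurd hps (pvSplitChar_ne_nil c [] rest)
      | cons p ps =>
        rw [hps] at h2
        simp only [List.reverse_nil, List.nil_append] at h2
        calc List.intercalate [c] (pre.reverse :: p :: ps)
            = pre.reverse ++ [c] ++ List.intercalate [c] (p :: ps) := by simp [List.intercalate]
          _ = pre.reverse ++ [c] ++ rest := by rw [h2]
          _ = pre.reverse ++ c :: rest := by simp
    · rw [pvSplitChar, if_neg hc, ih (c :: pre)]
      simp

-- pointwise boolean bridges between pvClassify and the char tests of port B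
lemma pvChar_x (c : Char) : (pvClassify c == 'x') = PySem.Chars.isdigit c := by
  by_cases h : '0' ≤ c ∧ c ≤ '9'
  · simp [(pvClassify_x c).mpr h, PySem.Chars.isdigit, h.1, h.2]
  · have hx : pvClassify c ≠ 'x' := fun hx => h ((pvClassify_x c).mp hx)
    rcases not_and_or.mp h with h' | h' <;> simp [PySem.Chars.isdigit, hx, h']

lemma pvIsdigit_map (g : List Char) :
    pvIsXs (g.map pvClassify) = PySem.Chars.strIsdigit g := by
  simp [pvIsXs, PySem.Chars.strIsdigit, List.all_map, Function.comp_def, pvChar_x]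

lemma pvStartswith_map (l : List Char) :
    PySem.Chars.startswith (l.map pvClassify) ['-'] = PySem.Chars.startswith l ['-'] := by
  cases l with
  | nil => rfl
  | cons c rest =>
    by_cases h : c = '-'
    · subst h
      simp [PySem.Chars.startswith, List.isPrefixOf, (pvClassify_dash '-').mpr rfl]
    · have hx : pvClassify c ≠ '-' := fun hx => h ((pvClassify_dash c).mp hx)
      simp only [PySem.Chars.startswith, List.isPrefixOf, List.map_cons]
      have h1 : ('-' == pvClassify c) = false := beq_eq_false_iff_ne.mpr (fun h' => hx h'.symm)
      have h2 : ('-' == c) = false := beq_eq_false_iff_ne.mpr (fun h' => h h'.symm)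
      simp [h1, h2]

lemma pvMap_splitChar_comma (u : List Char) :
    pvSplitChar ',' [] (u.map pvClassify) = (pvSplitChar ',' [] u).map (List.map pvClassify) := by
  have h := pvMap_splitChar pvClassify ',' pvClassify_comma u []
  simpa using h

lemma pvMap_splitChar_dot (u : List Char) :
    pvSplitChar '.' [] (u.map pvClassify) = (pvSplitChar '.' [] u).map (List.map pvClassify) := by
  have h := pvMap_splitChar pvClassify '.' pvClassify_dot u []
  simpa using h

lemma pvHeadD_map (xs : List (List Char)) :
    (xs.map (List.map pvClassify)).headD [] = (xs.headD []).map pvClassify := by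
  cases xs <;> simp

-- port B computes pvPbool of the classified string
lemma pvB_eq (s : String) :
    abnf_verifica_numero_milhares_decimais_alt s = pvPbool (s.toList.map pvClassify) := by
  unfold abnf_verifica_numero_milhares_decimais_alt pvPbool pvBody
  simp only []
  rw [PySem.Chars.slice_eq_listSlice, PySem.List.slice_from s.toList (by norm_num : (0:Int) ≤ 1)]
  rw [pvStartswith_map]
  by_cases hneg : PySem.Chars.startswith s.toList ['-'] = true
  · simp only [hneg, if_true, Int.toNat_one]
    rw [← List.map_drop]
    generalize s.toList.drop 1 = u
    simp only [pvSplitOn_char, pvMap_splitChar_comma, pvMap_splitChar_dot, pvHeadD_map,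
      List.length_map, pvIsdigit_map, ← List.map_drop, List.all_map, Function.comp_def]
  · simp only [Bool.not_eq_true] at hneg
    simp only [hneg, Bool.false_eq_true, if_false]
    generalize s.toList = u
    simp only [pvSplitOn_char, pvMap_splitChar_comma, pvMap_splitChar_dot, pvHeadD_map,
      List.length_map, pvIsdigit_map, ← List.map_drop, List.all_map, Function.comp_def]


-- every table entry is accepted by pvPbool and lies outside pvDt
lemma pvAllL : pvLsvalido.all (fun t => pvPbool t && !(decide (pvDt t))) = true := by decide

-- inside pvDt: not in the table, accepted by pvPbool
lemma pvDtP (k : Nat) (h1 : 1 ≤ k) (h6 : k ≤ 6) :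
    (pvPatX ++ List.replicate k 'x') ∉ pvLsvalido ∧
      pvPbool (pvPatX ++ List.replicate k 'x') = true := by
  interval_cases k <;> exact (by decide)

def pvMk (neg : Bool) (j m2 k : Nat) : List Char :=
  (if neg then ['-'] else []) ++
    List.intercalate ['.'] (List.replicate j 'x' :: List.replicate m2 (List.replicate 3 'x')) ++
    ',' :: List.replicate k 'x'

lemma pvFinal (neg : Bool) (j m2 k : Nat) (hj1 : 1 ≤ j) (hj3 : j ≤ 3) (hm : m2 ≤ 2)
    (hk1 : 1 ≤ k) (hk6 : k ≤ 6) :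
    pvMk neg j m2 k ∈ pvLsvalido ∨ pvDt (pvMk neg j m2 k) := by
  interval_cases j <;> interval_cases m2 <;> interval_cases k <;> cases neg <;> exact (by decide)

lemma pvBody_shape (u : List Char) (h : pvBody u = true) :
    ∃ j m2 k, 1 ≤ j ∧ j ≤ 3 ∧ m2 ≤ 2 ∧ 1 ≤ k ∧ k ≤ 6 ∧
      u = List.intercalate ['.'] (List.replicate j 'x' :: List.replicate m2 (List.replicate 3 'x'))
          ++ ',' :: List.replicate k 'x' := by
  unfold pvBody at h
  simp only [] at h
  have hlen : (pvSplitChar ',' [] u).length = 2 := by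
    by_contra hne
    rw [if_pos hne] at h
    exact absurd h (by simp)
  obtain ⟨a, b, hab⟩ := List.length_eq_two.mp hlen
  have hu : u = a ++ ',' :: b := by
    have h2 := pvIntercalate_splitChar ',' u []
    rw [hab] at h2
    simp only [List.reverse_nil, List.nil_append] at h2
    rw [← h2]
    simp [List.intercalate]
  rw [hab] at h
  simp only [List.length_cons, List.length_nil] at h
  rw [if_neg (by omega)] at h
  simp only [List.headD_cons, List.drop_succ_cons, List.drop_zero] at h
  -- peel the remaining ifs
  have hdec : 1 ≤ b.length ∧ b.length ≤ 6 ∧ pvIsXs b = true := by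
    by_contra hc
    rw [if_pos hc] at h
    exact absurd h (by simp)
  rw [if_neg (not_not_intro hdec)] at h
  have hglen : ¬ (3 < (pvSplitChar '.' [] a).length) := by
    intro hgt
    rw [if_pos hgt] at h
    exact absurd h (by simp)
  rw [if_neg hglen] at h
  have hg0 : 1 ≤ ((pvSplitChar '.' [] a).headD []).length ∧
      ((pvSplitChar '.' [] a).headD []).length ≤ 3 ∧
      pvIsXs ((pvSplitChar '.' [] a).headD []) = true := by
    by_contra hc
    rw [if_pos hc] at h
    exact absurd h (by simp)
  rw [if_neg (not_not_intro hg0)] at h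
  -- decimal part is a block of 'x'
  have hbrep : b = List.replicate b.length 'x' := by
    have hx := hdec.2.2
    simp only [pvIsXs, Bool.and_eq_true, List.all_eq_true, beq_iff_eq] at hx
    exact List.eq_replicate_of_mem hx.2
  -- integer-part groups
  have hint := pvIntercalate_splitChar '.' a []
  simp only [List.reverse_nil, List.nil_append] at hint
  cases hgs : pvSplitChar '.' [] a with
  | nil => exact absurd hgs (pvSplitChar_ne_nil '.' [] a)
  | cons g0 gs =>
    rw [hgs] at h hg0 hint hglen
    simp only [List.headD_cons, List.drop_succ_cons, List.drop_zero] at h hg0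
    have hg0rep : g0 = List.replicate g0.length 'x' := by
      have hx := hg0.2.2
      simp only [pvIsXs, Bool.and_eq_true, List.all_eq_true, beq_iff_eq] at hx
      exact List.eq_replicate_of_mem hx.2
    have hgsrep : gs = List.replicate gs.length (List.replicate 3 'x') := by
      refine List.eq_replicate_of_mem ?_
      intro g hg
      have hx := List.all_eq_true.mp h g hg
      simp only [Bool.and_eq_true, beq_iff_eq, pvIsXs, List.all_eq_true] at hx
      have hgrep : g = List.replicate g.length 'x' := List.eq_replicate_of_mem hx.2.2
      rw [hgrep, hx.1]
    refine ⟨g0.length, gs.length, b.length, hg0.1, hg0.2.1, ?_, hdec.1, hdec.2.1, ?_⟩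
    · simp only [List.length_cons] at hglen
      omega
    · rw [hu, ← hbrep, ← hint, ← hg0rep, ← hgsrep]

lemma pvPbool_imp (t : List Char) (h : pvPbool t = true) : t ∈ pvLsvalido ∨ pvDt t := by
  unfold pvPbool at h
  by_cases hneg : PySem.Chars.startswith t ['-'] = true
  · obtain ⟨u, hu⟩ : ∃ u, t = '-' :: u := by
      rcases (PySem.Chars.startswith_iff t ['-']).mp hneg with ⟨r, hr⟩
      exact ⟨r, hr.symm⟩
    rw [if_pos hneg, hu, List.drop_succ_cons, List.drop_zero] at h
    obtain ⟨j, m2, k, hj1, hj3, hm, hk1, hk6, hsh⟩ := pvBody_shape _ h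
    have : t = pvMk true j m2 k := by rw [hu, hsh]; rfl
    rw [this]
    exact pvFinal true j m2 k hj1 hj3 hm hk1 hk6
  · rw [if_neg hneg] at h
    obtain ⟨j, m2, k, hj1, hj3, hm, hk1, hk6, hsh⟩ := pvBody_shape _ h
    have : t = pvMk false j m2 k := by rw [hsh]; rfl
    rw [this]
    exact pvFinal false j m2 k hj1 hj3 hm hk1 hk6


-- per-char: the digit mask of D_ against pvClassify
lemma pvMaskChar (c r : Char) (hr : r = '0' ∨ r = '-' ∨ r = '.' ∨ r = ',') :
    ((if '0' ≤ c ∧ c ≤ '9' then '0' else c) = r) ↔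
      (pvClassify c = (if r = '0' then 'x' else r)) := by
  by_cases h : '0' ≤ c ∧ c ≤ '9'
  · rcases hr with rfl | rfl | rfl | rfl <;>
      simp only [if_pos h, (pvClassify_x c).mpr h] <;> simp
  · have hx : pvClassify c ≠ 'x' := fun hc => h ((pvClassify_x c).mp hc)
    rcases hr with rfl | rfl | rfl | rfl
    · rw [if_neg h, if_pos rfl]
      constructor
      · intro hc; subst hc; exact absurd ((pvClassify_x _).mpr ⟨by decide, by decide⟩) hx
      · intro hc; exact absurd hc hx
    · rw [if_neg h, if_neg (by decide)]
      exact (pvClassify_dash c).symm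
    · rw [if_neg h, if_neg (by decide)]
      exact (pvClassify_dot c).symm
    · rw [if_neg h, if_neg (by decide)]
      exact (pvClassify_comma c).symm

lemma pvMapMask_iff : ∀ (l R : List Char), (∀ r ∈ R, r = '0' ∨ r = '-' ∨ r = '.' ∨ r = ',') →
    (l.map (fun c => if '0' ≤ c ∧ c ≤ '9' then '0' else c) = R ↔
      l.map pvClassify = R.map (fun r => if r = '0' then 'x' else r)) := by
  intro l
  induction l with
  | nil =>
    intro R _
    cases R <;> simp
  | cons c rest ih =>
    intro R hR
    cases R with
    | nil => simp
    | cons r R' =>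
      simp only [List.map_cons, List.cons.injEq]
      rw [ih R' (fun r hr => hR r (List.mem_cons_of_mem _ hr)),
        pvMaskChar c r (hR r List.mem_cons_self)]

-- D_ is exactly pvDt of the classified string
lemma pvD_eq (s : String) :
    D_abnf_verifica_numero_milhares_decimais s ↔ pvDt (s.toList.map pvClassify) := by
  unfold D_abnf_verifica_numero_milhares_decimais pvDt pvPatX
  rw [List.length_map]
  refine and_congr Iff.rfl (and_congr Iff.rfl ?_)
  have hmask : (fun c => if PySem.Chars.isdigit c = true then '0' else c)
      = (fun c => if '0' ≤ c ∧ c ≤ '9' then '0' else c) := by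
    funext c
    rcases Decidable.em ('0' ≤ c ∧ c ≤ '9') with h | h
    · simp [PySem.Chars.isdigit, h.1, h.2]
    · rcases not_and_or.mp h with h' | h' <;> simp [PySem.Chars.isdigit, h']
  rw [hmask, show "-000.000.000,".toList = ['-','0','0','0','.','0','0','0','.','0','0','0',','] from rfl]
  rw [pvMapMask_iff s.toList
      (['-','0','0','0','.','0','0','0','.','0','0','0',','] ++
        List.replicate (s.toList.length - 13) '0')
      (by
        intro r hr
        rcases List.mem_append.mp hr with hm | hm
        · fin_cases hm <;> simp
        · simp [List.eq_of_mem_replicate hm])]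
  rw [List.map_append, List.map_replicate]
  simp


-- ===== VERDICT (by name: the statement is the Claim_ definition above) =====
theorem abnf_verifica_numero_milhares_decimais_spec : Claim_unchanged_abnf_verifica_numero_milhares_decimais := by
  intro s _ hD
  rw [pvA_eq, pvB_eq]
  rw [pvD_eq] at hD
  rcases hB : pvPbool (s.toList.map pvClassify) with _ | _
  · simp only [decide_eq_false_iff_not]
    intro hmem
    have := List.all_eq_true.mp pvAllL _ hmem
    simp [hB] at this
  · rcases pvPbool_imp _ hB with hmem | hdt
    · simp [hmem]
    · exact absurd hdt hD
theorem abnf_verifica_numero_milhares_decimais_changed : Claim_changed_abnf_verifica_numero_milhares_decimais := by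
  unfold Claim_changed_abnf_verifica_numero_milhares_decimais; decide
theorem abnf_verifica_numero_milhares_decimais_tight : Claim_exact_abnf_verifica_numero_milhares_decimais := by
  intro s _ hD
  rw [pvA_eq, pvB_eq]
  rw [pvD_eq] at hD
  obtain ⟨h14, h19, hshape⟩ := hD
  rw [List.length_map] at h14 h19 hshape
  have hk1 : 1 ≤ s.toList.length - 13 := by omega
  have hk6 : s.toList.length - 13 ≤ 6 := by omega
  obtain ⟨hnm, hpb⟩ := pvDtP _ hk1 hk6
  rw [hshape, hpb]
  simp only [ne_eq, decide_eq_true_eq]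
  exact hnm
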